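-- pv_equiv track=rewrite | github.com/binupstart/weeklymovements | yoy_funnel.py | _consecutive_direction
-- ===== SOURCE A (Python) =====
-- def _consecutive_direction(vals: list) -> tuple[int, str]:
--     """
--     Returns (streak_length, 'up'|'down'|'flat') for the most recent run
--     of the same sign at the end of vals.
--     """
--     clean = [(i, v) for i, v in enumerate(vals) if v is not None]
--     if len(clean) < 2:
--         return 0, "flat"
--     # Walk backwards from the end
--     last_sign = 1 if clean[-1][1] > 0 else -1
--     streak = 1
--     for i in range(len(clean) - 2, -1, -1):
--         s = 1 if clean[i][1] > 0 else -1
--         if s == last_sign: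
--             streak += 1
--         else:
--             break
--     direction = "up" if last_sign > 0 else "down"
--     return streak, direction
-- ===== SOURCE B (Python) =====
-- def _consecutive_direction(vals: list) -> tuple[int, str]:
--     """
--     Returns (streak_length, 'up'|'down'|'flat') for the most recent run
--     of the same sign at the end of vals.
--     """
--     signs = [1 if v > 0 else -1 for v in vals if v is not None]
--     if len(signs) < 2:
--         return 0, "flat"
--     cur = None
--     streak = 0
--     for s in signs:
--         if s == cur:
--             streak += 1
--         else:
--             cur, streak = s, 1
--     return streak, "up" if cur > 0 else "down"
-- ===== Notes on version B (the rewrite author's own statement) =====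
-- stated objective: simpler
-- what changed: Replaces A's enumerate-filter plus backward index scan with break by a sign-list comprehension and a single forward pass that keeps only the current run's sign and length.
import Mathlib
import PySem

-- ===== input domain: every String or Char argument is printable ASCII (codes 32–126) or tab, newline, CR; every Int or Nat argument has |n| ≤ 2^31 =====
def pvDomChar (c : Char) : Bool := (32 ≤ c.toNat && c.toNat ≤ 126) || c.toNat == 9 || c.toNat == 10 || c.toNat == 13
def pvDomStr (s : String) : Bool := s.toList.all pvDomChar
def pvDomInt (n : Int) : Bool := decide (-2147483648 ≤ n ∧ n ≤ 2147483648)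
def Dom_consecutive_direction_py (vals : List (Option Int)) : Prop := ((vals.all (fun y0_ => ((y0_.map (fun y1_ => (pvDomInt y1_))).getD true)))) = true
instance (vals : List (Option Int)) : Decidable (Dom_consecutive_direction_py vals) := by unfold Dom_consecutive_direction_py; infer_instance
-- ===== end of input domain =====

-- B replaces A's backward scan-with-break by a single forward pass that keeps only the
-- current run's sign and length (objective: simpler one-pass decomposition, same cost).

-- ===== PORT A =====
-- A's backward `for i in range(len(clean)-2, -1, -1)` with `break`
def pvALoop (clean : List (Int × Int)) (last_sign : Int) : List Int → Int → Int
  | [], streak => streak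
  | i :: rest, streak =>
    let s : Int := if (PySem.List.pyGetD clean i (0, 0)).2 > 0 then 1 else -1
    if s == last_sign then pvALoop clean last_sign rest (streak + 1) else streak

def consecutive_direction_py (vals : List (Option Int)) : Int × String :=
  let clean : List (Int × Int) :=
    (PySem.List.enumerate vals 0).filterMap (fun p => p.2.map (fun v => (p.1, v)))
  if clean.length < 2 then (0, "flat")
  else
    let last_sign : Int := if (PySem.List.pyGetD clean (-1) (0, 0)).2 > 0 then 1 else -1
    let streak : Int :=
      pvALoop clean last_sign (PySem.List.pyRange ((clean.length : Int) - 2) (-1) (-1)) 1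
    let direction := if last_sign > 0 then "up" else "down"
    (streak, direction)

-- ===== PORT B =====
-- B's forward `for s in signs` keeping (current sign, current run length)
def pvBLoop : List Int → Option Int → Int → Option Int × Int
  | [], cur, streak => (cur, streak)
  | s :: rest, cur, streak =>
    if some s == cur then pvBLoop rest cur (streak + 1)
    else pvBLoop rest (some s) 1

def consecutive_direction_py_alt (vals : List (Option Int)) : Int × String :=
  let signs : List Int := vals.filterMap (fun v => v.map (fun x => if x > 0 then (1 : Int) else -1))
  if signs.length < 2 then (0, "flat")
  else
    let r := pvBLoop signs none 0
    (r.2, if r.1.getD 0 > 0 then "up" else "down")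

-- ===== PRECONDITION & SPEC =====
def Spec_consecutive_direction_py (vals : List (Option Int)) (out : Int × String) : Prop := out = consecutive_direction_py_alt vals
instance (vals : List (Option Int)) (out : Int × String) : Decidable (Spec_consecutive_direction_py vals out) := by unfold Spec_consecutive_direction_py; infer_instance

-- ===== CLAIM (what is proved, stated in full; the proofs are below) =====
def Claim_equal_consecutive_direction_py : Prop := ∀ (vals : List (Option Int)), Dom_consecutive_direction_py vals → Spec_consecutive_direction_py vals (consecutive_direction_py vals)

-- ===== LEMMAS AND PROOFS =====

theorem pv_clean_map_snd (vals : List (Option Int)) : ∀ s : Int,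
    ((PySem.List.enumerate vals s).filterMap (fun p => p.2.map (fun v => (p.1, v)))).map (·.2)
      = vals.filterMap id := by
  induction vals with
  | nil => intro s; simp [PySem.List.enumerate_nil]
  | cons x xs ih =>
    intro s
    cases x <;> simp [PySem.List.enumerate_cons, ih]

theorem pvALoop_pyRange (c : List (Int × Int)) (ls : Int) :
    ∀ (k : Nat), k < c.length → ∀ streak : Int,
    pvALoop c ls (PySem.List.pyRange (k : Int) (-1) (-1)) streak
      = streak + ((((c.take (k + 1)).reverse).takeWhile
          (fun p => (if p.2 > 0 then (1 : Int) else -1) == ls)).length : Int) := by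
  intro k
  induction k with
  | zero =>
    intro hk streak
    rw [Nat.cast_zero, PySem.List.pyRange_neg_one_cons (by norm_num),
      PySem.List.pyRange_neg_one_eq_nil (by norm_num)]
    obtain ⟨hd, tl, rfl⟩ := List.exists_cons_of_ne_nil (List.length_pos_iff.mp hk)
    simp only [pvALoop, PySem.List.pyGetD_zero_cons, List.take_succ_cons, List.take_zero,
      List.reverse_cons, List.reverse_nil, List.nil_append, List.takeWhile]
    by_cases hb : (if hd.2 > 0 then (1 : Int) else -1) = ls
    · simp [hb]
    · have hb' : ((if 0 < hd.2 then (1 : Int) else -1) == ls) = false := by simpa using hb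
      simp [hb']
  | succ k ih =>
    intro hk streak
    have h1 : ((k + 1 : Nat) : Int) = (k : Int) + 1 := by push_cast; ring
    rw [h1, PySem.List.pyRange_neg_one_cons (by omega)]
    simp only [pvALoop]
    rw [show ((k : Int) + 1 - 1) = (k : Int) by ring]
    have hn : ((k : Int) + 1).toNat = k + 1 := by omega
    obtain ⟨e, he⟩ : ∃ e, getElem? c (k + 1) = some e := ⟨_, List.getElem?_eq_getElem hk⟩
    have hget : PySem.List.pyGetD c ((k : Int) + 1) (0, 0) = e := by
      rw [PySem.List.pyGetD_eq_getElem c (0, 0) (by omega) (by omega)]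
      obtain ⟨_, hce⟩ := List.getElem?_eq_some_iff.mp he
      simp only [hn]
      exact hce
    have htake : c.take (k + 1 + 1) = c.take (k + 1) ++ [e] := by
      rw [List.take_add_one, he]
      rfl
    rw [hget, htake, List.reverse_append]
    by_cases hb : (if e.2 > 0 then (1 : Int) else -1) = ls
    · rw [if_pos (by simp [hb]), ih (by omega) (streak + 1)]
      simp only [List.reverse_cons, List.reverse_nil, List.nil_append, List.singleton_append,
        List.takeWhile_cons, hb, beq_self_eq_true, if_true, List.length_cons]
      push_cast
      ring
    · rw [if_neg (by simp [hb])]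
      have hb' : ((if 0 < e.2 then (1 : Int) else -1) == ls) = false := by simpa using hb
      simp [hb']

theorem pvBLoop_append (x : Int) : ∀ (l : List Int) (cur : Option Int) (streak : Int),
    pvBLoop (l ++ [x]) cur streak
      = (let r := pvBLoop l cur streak;
         if some x == r.1 then (r.1, r.2 + 1) else (some x, 1)) := by
  intro l
  induction l with
  | nil =>
    intro cur streak
    simp only [List.nil_append, pvBLoop]
  | cons a t ih =>
    intro cur streak
    simp only [List.cons_append, pvBLoop]
    split <;> rw [ih]

theorem pvBLoop_spec : ∀ (l : List Int) (x : Int),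
    pvBLoop (l ++ [x]) none 0
      = (some x, 1 + ((l.reverse.takeWhile (fun v => v == x)).length : Int)) := by
  intro l
  induction l using List.reverseRecOn with
  | nil => intro x; simp [pvBLoop]
  | append_singleton m y ih =>
    intro x
    rw [pvBLoop_append, ih y]
    simp only [List.reverse_append, List.reverse_singleton, List.singleton_append,
      List.takeWhile_cons]
    by_cases h : x = y
    · subst h
      simp only [beq_self_eq_true, if_true, List.length_cons, Prod.mk.injEq]
      refine ⟨by simp, by push_cast; ring⟩
    · have hb : (some x == some y) = false := by simp [h]
      have hb2 : (y == x) = false := by simp [Ne.symm h]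
      simp [hb, hb2]

def pvSgn (x : Int) : Int := if x > 0 then 1 else -1

theorem pv_signs_eq' (vals : List (Option Int)) :
    vals.filterMap (fun v => v.map (fun x => if x > 0 then (1 : Int) else -1))
      = (vals.filterMap id).map pvSgn := by
  induction vals with
  | nil => simp
  | cons x xs ih => cases x <;> simp [pvSgn, ih]

theorem consecutive_direction_py_spec' (vals : List (Option Int)) :
    consecutive_direction_py vals = consecutive_direction_py_alt vals := by
  unfold consecutive_direction_py consecutive_direction_py_alt
  rw [pv_signs_eq' vals]
  have hmap : ((PySem.List.enumerate vals 0).filterMap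
      (fun p => p.2.map (fun v => (p.1, v)))).map (·.2) = vals.filterMap id :=
    pv_clean_map_snd vals 0
  generalize hc : (PySem.List.enumerate vals 0).filterMap
      (fun p => p.2.map (fun v => (p.1, v))) = c at hmap ⊢
  generalize hw : vals.filterMap id = ws at hmap ⊢
  have hclen : c.length = ws.length := by rw [← hmap, List.length_map]
  dsimp only
  by_cases hlt : ws.length < 2
  · have hA2 : c.length < 2 := by rw [hclen]; exact hlt
    have hB2 : (List.map pvSgn ws).length < 2 := by simpa using hlt
    rw [if_pos hA2, if_pos hB2]
  · have hA2 : ¬c.length < 2 := by rw [hclen]; exact hlt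
    have hB2 : ¬(List.map pvSgn ws).length < 2 := by simpa using hlt
    rw [if_neg hA2, if_neg hB2]
    have hne : ws ≠ [] := by
      intro h; rw [h] at hlt; simp at hlt
    have hcne : c ≠ [] := by
      intro h
      apply hne
      rw [h] at hclen
      simp at hclen
      exact List.eq_nil_of_length_eq_zero hclen.symm
    obtain ⟨m, w, rfl⟩ : ∃ m w, ws = m ++ [w] := by
      rcases List.eq_nil_or_concat ws with h | ⟨m, w, h⟩
      · exact absurd h hne
      · exact ⟨m, w, by simpa using h⟩
    have hmlen : 1 ≤ m.length := by
      have : (m ++ [w]).length = m.length + 1 := by simp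
      omega
    -- last element of c projects to w
    have hlast : (PySem.List.pyGetD c (-1) (0, 0)).2 = w := by
      rw [PySem.List.pyGetD_neg_one c (0, 0) hcne]
      have h2 : (c.map (·.2)).getLast? = some w := by rw [hmap]; simp
      rw [List.getLast?_map, List.getLast?_eq_some_getLast hcne] at h2
      simpa using h2
    -- B side via pvBLoop_spec
    rw [List.map_append, List.map_singleton, pvBLoop_spec]
    -- A side streak via pvALoop_pyRange
    have hlen2 : 2 ≤ c.length := by omega
    have hk : c.length - 2 < c.length := by omega
    have hcast : ((c.length : Int) - 2) = ((c.length - 2 : Nat) : Int) := by omega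
    rw [hcast, pvALoop_pyRange c _ (c.length - 2) hk 1]
    have htake : c.take (c.length - 2 + 1) = c.dropLast := by
      rw [List.dropLast_eq_take]
      congr 1
      omega
    rw [htake, hlast]
    -- relate the two takeWhile counts
    have hdmap : c.dropLast.map (·.2) = m := by
      have h4 : (c.map (·.2)).dropLast = m := by rw [hmap]; simp
      rw [← List.map_dropLast] at h4
      exact h4
    have h2 : c.dropLast.reverse.map (·.2) = m.reverse := by
      rw [List.map_reverse, hdmap]
    have hcount :
        ((c.dropLast.reverse).takeWhile
            (fun p => (if p.2 > 0 then (1 : Int) else -1) == (if w > 0 then (1 : Int) else -1))).length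
          = (((m.map pvSgn).reverse).takeWhile (fun v => v == pvSgn w)).length := by
      calc ((c.dropLast.reverse).takeWhile
            (fun p => (if p.2 > 0 then (1 : Int) else -1) == (if w > 0 then (1 : Int) else -1))).length
          = ((c.dropLast.reverse.map (·.2)).takeWhile
              (fun v => (if v > 0 then (1 : Int) else -1) == (if w > 0 then (1 : Int) else -1))).length := by
            rw [List.takeWhile_map, List.length_map]
            rfl
        _ = ((m.reverse).takeWhile
              (fun v => (if v > 0 then (1 : Int) else -1) == (if w > 0 then (1 : Int) else -1))).length := by
            rw [h2]
        _ = (((m.map pvSgn).reverse).takeWhile (fun v => v == pvSgn w)).length := by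
            rw [← List.map_reverse, List.takeWhile_map, List.length_map]
            rfl
    rw [hcount]
    -- compare the two components
    simp only [Prod.mk.injEq, Option.getD_some]
    constructor
    · push_cast
    · by_cases hw : w > 0 <;> simp [pvSgn, hw]

-- ===== VERDICT (by name: the statement is the Claim_ definition above) =====
theorem consecutive_direction_py_spec : Claim_equal_consecutive_direction_py := by
  intro vals _
  exact consecutive_direction_py_spec' vals
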